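-- pv_equiv track=rewrite | github.com/nikube/doliconstdoc | src/doliconstdoc/sqldump.py | _split_secret_boundaries
-- ===== SOURCE A (Python) =====
-- _SECRET_PREFIXES = (
--     "sk_live_", "sk_test_", "pk_live_", "pk_test_",
--     "rk_live_", "rk_test_",  # Stripe restricted keys
-- )
--
-- def _split_secret_boundaries(s: str) -> list[str]:
--     """Split s so every `sk_live_` (etc.) prefix ends up at the end of
--     one chunk (not followed immediately by chars in the same chunk).
--     """
--     out = [s]
--     for pref in _SECRET_PREFIXES:
--         new: list[str] = []
--         for chunk in out:
--             if pref in chunk: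
--                 parts = chunk.split(pref)
--                 for i, p in enumerate(parts):
--                     if i == 0:
--                         new.append(p + pref) if len(parts) > 1 else new.append(p)
--                     elif i == len(parts) - 1:
--                         new.append(p)
--                     else:
--                         new.append(p + pref)
--                 # If chunk ended exactly on prefix, tail is empty; filter.
--                 new = [x for x in new if x != ""]
--             else:
--                 new.append(chunk)
--         out = new
--     return out
-- ===== SOURCE B (Python) =====
-- import re
--
-- _SECRET_PREFIXES = (
--     "sk_live_", "sk_test_", "pk_live_", "pk_test_",
--     "rk_live_", "rk_test_",  # Stripe restricted keys
-- )
--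
-- _BOUNDARY_RE = re.compile(
--     "|".join("(?<={})".format(p) for p in _SECRET_PREFIXES)
-- )
--
-- def _split_secret_boundaries(s: str) -> list[str]:
--     """Split s so every secret prefix ends a chunk: one regex pass that
--     cuts right after each prefix occurrence (zero-width lookbehind)."""
--     chunks = _BOUNDARY_RE.split(s)
--     if len(chunks) == 1:
--         return chunks
--     return [c for c in chunks if c]
-- ===== Notes on version B (the rewrite author's own statement) =====
-- stated objective: idiomatic
-- what changed: Replaces A's six sequential split-and-reglue passes (one pass per secret prefix, each rescanning every chunk) by a single regex split using a zero-width lookbehind alternation that cuts the string once right after every prefix occurrence, then drops empty chunks.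
import Mathlib
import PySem

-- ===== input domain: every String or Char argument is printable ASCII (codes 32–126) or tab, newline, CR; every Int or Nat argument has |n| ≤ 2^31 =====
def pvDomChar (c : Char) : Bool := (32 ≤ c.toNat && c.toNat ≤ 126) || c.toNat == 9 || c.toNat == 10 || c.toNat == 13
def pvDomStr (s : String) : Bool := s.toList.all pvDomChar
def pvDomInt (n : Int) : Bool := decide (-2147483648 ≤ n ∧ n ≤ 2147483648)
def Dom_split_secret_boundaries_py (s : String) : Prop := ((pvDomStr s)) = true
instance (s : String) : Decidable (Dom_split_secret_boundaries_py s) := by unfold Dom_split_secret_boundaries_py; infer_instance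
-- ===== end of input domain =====

-- B replaces A's six repeated split-and-reglue passes by one regex-style split at every
-- position right after a secret prefix (zero-width lookbehind), then drops empty chunks
-- (objective: idiomatic single scan; no speed claim).

-- ===== PORT A =====

-- the six Stripe prefixes, as code-point lists
def pvPrefixes : List (List Char) :=
  [['s','k','_','l','i','v','e','_'], ['s','k','_','t','e','s','t','_'],
   ['p','k','_','l','i','v','e','_'], ['p','k','_','t','e','s','t','_'],
   ['r','k','_','l','i','v','e','_'], ['r','k','_','t','e','s','t','_']]

-- parts = chunk.split(pref)  (pref is never empty, so split? never raises)
def pvParts (chunk pref : List Char) : List (List Char) :=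
  (PySem.Chars.split? chunk pref).getD []

-- body of A's `for i, p in enumerate(parts)` loop: i == 0 / i == n-1 / middle
def pvAppendPiece (pref : List Char) (n : Nat) (acc : List (List Char))
    (pi : Int × List Char) : List (List Char) :=
  if pi.1 = 0 then (if 1 < n then acc ++ [pi.2 ++ pref] else acc ++ [pi.2])
  else if pi.1 = (n : Int) - 1 then acc ++ [pi.2]
  else acc ++ [pi.2 ++ pref]

-- body of A's inner `for chunk in out` loop
def pvAInner (pref : List Char) (new : List (List Char)) (chunk : List Char) : List (List Char) :=
  if PySem.Chars.isIn pref chunk then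
    (((PySem.List.enumerate (pvParts chunk pref)).foldl
        (pvAppendPiece pref (pvParts chunk pref).length) new).filter
      (fun x => decide (x ≠ [])))
  else new ++ [chunk]

def split_secret_boundaries_py (s : String) : List String :=
  (pvPrefixes.foldl (fun out pref => out.foldl (pvAInner pref) []) [s.toList]).map String.ofList

-- ===== PORT B =====

-- zero-width lookbehind match positions: every i with some prefix ending exactly at i
def pvCutsOf (prefs : List (List Char)) (cs : List Char) : List Nat :=
  (List.range (cs.length + 1)).filter (fun i => prefs.any (fun p => PySem.Chars.endswith (cs.take i) p))

-- re.split at the zero-width matches: the pieces between consecutive match positions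
def pvChunksFrom (cs : List Char) (start : Nat) : List Nat → List (List Char)
  | [] => [cs.drop start]
  | i :: rest => ((cs.drop start).take (i - start)) :: pvChunksFrom cs i rest

def split_secret_boundaries_py_alt (s : String) : List String :=
  let cs := s.toList
  let cuts := pvCutsOf pvPrefixes cs
  if cuts.isEmpty then [s]
  else ((pvChunksFrom cs 0 cuts).filter (fun x => decide (x ≠ []))).map String.ofList

-- ===== PRECONDITION & SPEC =====
def Spec_split_secret_boundaries_py (s : String) (out : List String) : Prop := out = split_secret_boundaries_py_alt s
instance (s : String) (out : List String) : Decidable (Spec_split_secret_boundaries_py s out) := by unfold Spec_split_secret_boundaries_py; infer_instance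

-- ===== CLAIM (what is proved, stated in full; the proofs are below) =====
def Claim_equal_split_secret_boundaries_py : Prop := ∀ (s : String), Dom_split_secret_boundaries_py s → Spec_split_secret_boundaries_py s (split_secret_boundaries_py s)

-- ===== LEMMAS AND PROOFS =====

-- the canonical shape both programs are reduced to: B's chunks for any processed prefix set
def pvState (Q : List (List Char)) (cs : List Char) : List (List Char) :=
  if (pvCutsOf Q cs).isEmpty then [cs]
  else (pvChunksFrom cs 0 (pvCutsOf Q cs)).filter (fun x => decide (x ≠ []))

-- fuel-free reference form of Python str.split(sep) for sep = d :: ds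
def pvSref (d : Char) (ds : List Char) (l : List Char) : List (List Char) :=
  match l with
  | [] => [[]]
  | c :: rest =>
    if (d :: ds).isPrefixOf (c :: rest) then [] :: pvSref d ds (rest.drop ds.length)
    else (pvSref d ds rest).modifyHead (c :: ·)
termination_by l.length
decreasing_by
  · simp only [List.length_drop, List.length_cons]; omega
  · simp only [List.length_cons]; omega

-- cut a string right after each occurrence of d :: ds, leftmost first
def pvCutRec (d : Char) (ds : List Char) (c : List Char) : List (List Char) :=
  if PySem.Chars.find c (d :: ds) = -1 then [c]
  else c.take ((PySem.Chars.find c (d :: ds)).toNat + ds.length + 1) ::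
       pvCutRec d ds (c.drop ((PySem.Chars.find c (d :: ds)).toNat + ds.length + 1))
termination_by c.length
decreasing_by
  rename_i h
  cases c with
  | nil =>
    exfalso
    apply h
    have : ¬ ((d :: ds) <:+: ([] : List Char)) := by
      intro hinf
      exact absurd (List.eq_nil_of_infix_nil hinf) (by simp)
    exact (PySem.Chars.find_eq_neg_one_iff [] (d :: ds)).mpr this
  | cons a l => simp only [List.length_drop, List.length_cons]; omega

-- glue the split parts back together, separator at the end of every part but the last
def pvRejoin (p : List Char) : List (List Char) → List (List Char)
  | [] => []
  | [x] => [x]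
  | x :: y :: xs => (x ++ p) :: pvRejoin p (y :: xs)

-- plain equation lemmas for the recursive definitions above and for PySem's workers
theorem sref_nil (d : Char) (ds : List Char) : pvSref d ds [] = [[]] := by
  rw [pvSref]

theorem sref_cons (d : Char) (ds : List Char) (c : Char) (rest : List Char) :
    pvSref d ds (c :: rest) =
      if (d :: ds).isPrefixOf (c :: rest) then [] :: pvSref d ds (rest.drop ds.length)
      else (pvSref d ds rest).modifyHead (c :: ·) := by
  rw [pvSref]

theorem cutRec_eq (d : Char) (ds : List Char) (c : List Char) :
    pvCutRec d ds c =
      if PySem.Chars.find c (d :: ds) = -1 then [c]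
      else c.take ((PySem.Chars.find c (d :: ds)).toNat + ds.length + 1) ::
           pvCutRec d ds (c.drop ((PySem.Chars.find c (d :: ds)).toNat + ds.length + 1)) := by
  rw [pvCutRec]

theorem enum_nil {α : Type} (st : Int) : PySem.List.enumerate ([] : List α) st = [] := by
  rw [PySem.List.enumerate.eq_def]

theorem enum_cons {α : Type} (x : α) (xs : List α) (st : Int) :
    PySem.List.enumerate (x :: xs) st = (st, x) :: PySem.List.enumerate xs (st + 1) := by
  rw [PySem.List.enumerate.eq_def]

theorem findgo_nil (sub : List Char) (k : Nat) :
    PySem.Chars.find.go sub [] k = if sub.isEmpty then (k : Int) else -1 := by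
  rw [PySem.Chars.find.go.eq_def]

theorem findgo_cons (sub : List Char) (c : Char) (rest : List Char) (k : Nat) :
    PySem.Chars.find.go sub (c :: rest) k =
      if sub.isPrefixOf (c :: rest) then (k : Int)
      else PySem.Chars.find.go sub rest (k + 1) := by
  rw [PySem.Chars.find.go.eq_def]

theorem splitgo_succ_nil (sep : List Char) (f : Nat) (cur : List Char) (acc : List (List Char)) :
    PySem.Chars.splitOn.go sep (f + 1) [] cur acc = (cur.reverse :: acc).reverse := by
  rw [PySem.Chars.splitOn.go.eq_def]

theorem splitgo_succ_cons (sep : List Char) (f : Nat) (c : Char) (rest cur : List Char)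
    (acc : List (List Char)) :
    PySem.Chars.splitOn.go sep (f + 1) (c :: rest) cur acc =
      if sep.isPrefixOf (c :: rest) then
        PySem.Chars.splitOn.go sep f ((c :: rest).drop sep.length) [] (cur.reverse :: acc)
      else PySem.Chars.splitOn.go sep f rest (c :: cur) acc := by
  rw [PySem.Chars.splitOn.go.eq_def]

-- strictly ascending lists of naturals are determined by their members
theorem pairwise_lt_ext : ∀ (l1 l2 : List Nat), l1.Pairwise (· < ·) → l2.Pairwise (· < ·) →
    (∀ i, i ∈ l1 ↔ i ∈ l2) → l1 = l2 := by
  intro l1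
  induction l1 with
  | nil =>
    intro l2 _ _ h
    cases l2 with
    | nil => rfl
    | cons b u => exact absurd ((h b).mpr (by simp)) (by simp)
  | cons a t ih =>
    intro l2 h1 h2 h
    cases l2 with
    | nil => exact absurd ((h a).mp (by simp)) (by simp)
    | cons b u =>
      have hat : ∀ i ∈ t, a < i := (List.pairwise_cons.mp h1).1
      have hbu : ∀ i ∈ u, b < i := (List.pairwise_cons.mp h2).1
      have hab : a = b := by
        have ha : a = b ∨ a ∈ u := by
          have := (h a).mp (by simp); simpa using this
        have hb : b = a ∨ b ∈ t := by
          have := (h b).mpr (by simp); simpa using this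
        rcases ha with h' | ha
        · exact h'
        · rcases hb with h' | hb
          · omega
          · have := hat b hb; have := hbu a ha; omega
      subst hab
      have htu : t = u := by
        apply ih u (List.pairwise_cons.mp h1).2 (List.pairwise_cons.mp h2).2
        intro i
        constructor
        · intro hi
          have := (h i).mp (List.mem_cons_of_mem _ hi)
          rcases List.mem_cons.mp this with h' | h'
          · subst h'; exact absurd (hat _ hi) (by omega)
          · exact h'
        · intro hi
          have := (h i).mpr (List.mem_cons_of_mem _ hi)
          rcases List.mem_cons.mp this with h' | h'
          · subst h'; exact absurd (hbu _ hi) (by omega)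
          · exact h'
      rw [htu]

theorem mem_cutsOf {R : List (List Char)} {cs : List Char} {i : Nat} :
    i ∈ pvCutsOf R cs ↔ i ≤ cs.length ∧ ∃ p ∈ R, p <:+ cs.take i := by
  unfold pvCutsOf
  constructor
  · intro h
    obtain ⟨h1, h2⟩ := List.mem_filter.mp h
    refine ⟨by have := List.mem_range.mp h1; omega, ?_⟩
    obtain ⟨p, hp, hs⟩ := List.any_eq_true.mp h2
    exact ⟨p, hp, by simpa [PySem.Chars.endswith, List.isSuffixOf_iff_suffix] using hs⟩
  · rintro ⟨h1, p, hp, hs⟩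
    apply List.mem_filter.mpr
    refine ⟨List.mem_range.mpr (by omega), List.any_eq_true.mpr ⟨p, hp, ?_⟩⟩
    simpa [PySem.Chars.endswith, List.isSuffixOf_iff_suffix] using hs

theorem cut_bounds {R : List (List Char)} {cs : List Char} {i : Nat}
    (h8 : ∀ p ∈ R, p.length = 8) (h : i ∈ pvCutsOf R cs) : 8 ≤ i ∧ i ≤ cs.length := by
  obtain ⟨hi, p, hp, hocc⟩ := mem_cutsOf.mp h
  have hl : p.length ≤ (cs.take i).length := hocc.length_le
  rw [List.length_take, h8 p hp] at hl
  exact ⟨by omega, hi⟩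

theorem occ_eq {p cs : List Char} {i : Nat} (hp8 : p.length = 8) (hi : i ≤ cs.length)
    (h : p <:+ cs.take i) : 8 ≤ i ∧ p = (cs.drop (i - 8)).take 8 := by
  have hlen : (cs.take i).length = i := by rw [List.length_take]; omega
  have h8i : 8 ≤ i := by
    have := h.length_le; rw [hlen, hp8] at this; omega
  refine ⟨h8i, ?_⟩
  have hd := List.suffix_iff_eq_drop.mp h
  rw [hlen, hp8] at hd
  rw [hd, List.drop_take]
  congr 1
  omega

theorem occ_intro {p cs : List Char} {i : Nat} (h8i : 8 ≤ i) (hi : i ≤ cs.length)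
    (h : p = (cs.drop (i - 8)).take 8) : p <:+ cs.take i := by
  refine ⟨cs.take (i - 8), ?_⟩
  rw [h]
  have hsplit : i = (i - 8) + 8 := by omega
  conv_rhs => rw [hsplit, List.take_add]

theorem cut_order {cs p q : List Char} {i j : Nat} (hp8 : p.length = 8) (hq8 : q.length = 8)
    (hb : ∀ k, k < 8 → 0 < k → p.drop k ≠ q.take (8 - k))
    (hi : p <:+ cs.take i) (hj : q <:+ cs.take j)
    (hil : i ≤ cs.length) (hjl : j ≤ cs.length) (hij : i < j) : i + 8 ≤ j := by
  by_contra hlt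
  obtain ⟨hi8, hpe⟩ := occ_eq hp8 hil hi
  obtain ⟨hj8, hqe⟩ := occ_eq hq8 hjl hj
  apply hb (j - i) (by omega) (by omega)
  rw [hpe, hqe, List.drop_take, List.drop_drop, List.take_take]
  have h1 : (i - 8) + (j - i) = j - 8 := by omega
  have h2 : min (8 - (j - i)) 8 = 8 - (j - i) := by omega
  rw [h1, h2]

theorem cut_unique {cs p q : List Char} {i : Nat} (hp8 : p.length = 8) (hq8 : q.length = 8)
    (hil : i ≤ cs.length) (hi : p <:+ cs.take i) (hj : q <:+ cs.take i) : p = q := by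
  obtain ⟨_, hpe⟩ := occ_eq hp8 hil hi
  obtain ⟨_, hqe⟩ := occ_eq hq8 hil hj
  rw [hpe, hqe]

theorem cuts_pairwise (R : List (List Char)) (cs : List Char) :
    (pvCutsOf R cs).Pairwise (· < ·) :=
  List.Pairwise.filter _ List.pairwise_lt_range

-- move an occurrence into / out of a suffix of cs
theorem occ_shift {p cs : List Char} {e i : Nat} (hp8 : p.length = 8)
    (h8e : 8 + e ≤ i) (hil : i ≤ cs.length) :
    (p <:+ cs.take i) ↔ (p <:+ (cs.drop e).take (i - e)) := by
  constructor
  · intro h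
    obtain ⟨_, hpe⟩ := occ_eq hp8 hil h
    apply occ_intro (by omega) (by rw [List.length_drop]; omega)
    rw [List.drop_drop, hpe]
    congr 2
    omega
  · intro h
    have hbl : i - e ≤ (cs.drop e).length := by rw [List.length_drop]; omega
    obtain ⟨_, hpe⟩ := occ_eq hp8 hbl h
    apply occ_intro (by omega) hil
    rw [hpe, List.drop_drop]
    congr 2
    omega

theorem cuts_dec {R : List (List Char)} {cs : List Char} {e : Nat}
    (h8 : ∀ p ∈ R, p.length = 8)
    (hb : ∀ p ∈ R, ∀ q ∈ R, ∀ k, k < 8 → 0 < k → p.drop k ≠ q.take (8 - k))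
    (he : e ∈ pvCutsOf R cs) (hmin : ∀ i ∈ pvCutsOf R cs, e ≤ i) :
    pvCutsOf R cs = e :: (pvCutsOf R (cs.drop e)).map (· + e) := by
  obtain ⟨hel, q0, hq0, hocc0⟩ := mem_cutsOf.mp he
  apply pairwise_lt_ext _ _ (cuts_pairwise R cs)
  · apply List.pairwise_cons.mpr
    constructor
    · intro b hb'
      obtain ⟨r, hr, rfl⟩ := List.mem_map.mp hb'
      have := (cut_bounds h8 hr).1
      omega
    · rw [List.pairwise_map]
      exact (cuts_pairwise R (cs.drop e)).imp (by omega)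
  · intro i
    constructor
    · intro hi
      obtain ⟨hil, p, hpR, hocc⟩ := mem_cutsOf.mp hi
      have hei := hmin i hi
      rcases Nat.eq_or_lt_of_le hei with heq | hlt
      · rw [← heq]; exact List.mem_cons_self
      · have hord : e + 8 ≤ i :=
          cut_order (h8 q0 hq0) (h8 p hpR) (hb q0 hq0 p hpR) hocc0 hocc hel hil hlt
        apply List.mem_cons_of_mem
        refine List.mem_map.mpr ⟨i - e, ?_, by omega⟩
        apply mem_cutsOf.mpr
        refine ⟨by rw [List.length_drop]; omega, p, hpR, ?_⟩
        exact (occ_shift (e := e) (i := i) (h8 p hpR) (by omega) hil).mp hocc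
    · intro hi
      rcases List.mem_cons.mp hi with rfl | hi
      · exact he
      · obtain ⟨r, hr, rfl⟩ := List.mem_map.mp hi
        obtain ⟨hrl, p, hpR, hocc⟩ := mem_cutsOf.mp hr
        have hr8 := (cut_bounds h8 hr).1
        rw [List.length_drop] at hrl
        apply mem_cutsOf.mpr
        refine ⟨by omega, p, hpR, ?_⟩
        apply (occ_shift (e := e) (i := r + e) (h8 p hpR) (by omega) (by omega)).mpr
        rw [show r + e - e = r by omega]
        exact hocc

theorem cuts_union_dec {Q : List (List Char)} {p cs : List Char} {e : Nat}
    (h8 : ∀ r ∈ Q ++ [p], r.length = 8)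
    (hb : ∀ r ∈ Q ++ [p], ∀ s ∈ Q ++ [p], ∀ k, k < 8 → 0 < k → r.drop k ≠ s.take (8 - k))
    (hne : ∀ q ∈ Q, p ≠ q)
    (he : e ∈ pvCutsOf Q cs) (hmin : ∀ i ∈ pvCutsOf Q cs, e ≤ i) :
    pvCutsOf (Q ++ [p]) cs =
      pvCutsOf [p] (cs.take e) ++ e :: (pvCutsOf (Q ++ [p]) (cs.drop e)).map (· + e) := by
  have h8Q : ∀ r ∈ Q, r.length = 8 := fun r hr => h8 r (List.mem_append_left _ hr)
  have hp8 : p.length = 8 := h8 p (List.mem_append_right _ (by simp))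
  obtain ⟨hel, q0, hq0, hocc0⟩ := mem_cutsOf.mp he
  have he8 := (cut_bounds h8Q he).1
  have htl : (cs.take e).length = e := by rw [List.length_take]; omega
  have hl1 : ∀ x ∈ pvCutsOf [p] (cs.take e), x < e := by
    intro x hx
    obtain ⟨hxl, p', hp', hocc⟩ := mem_cutsOf.mp hx
    rw [htl] at hxl
    simp only [List.mem_singleton] at hp'
    subst hp'
    rcases Nat.eq_or_lt_of_le hxl with rfl | h
    · exfalso
      rw [List.take_take, Nat.min_self] at hocc
      exact hne q0 hq0 (cut_unique hp8 (h8Q q0 hq0) hel hocc hocc0)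
    · exact h
  apply pairwise_lt_ext _ _ (cuts_pairwise _ cs)
  · apply List.pairwise_append.mpr
    refine ⟨cuts_pairwise _ _, ?_, ?_⟩
    · apply List.pairwise_cons.mpr
      constructor
      · intro b hb'
        obtain ⟨r, hr, rfl⟩ := List.mem_map.mp hb'
        have := (cut_bounds h8 hr).1
        omega
      · rw [List.pairwise_map]
        exact (cuts_pairwise _ _).imp (by omega)
    · intro x hx y hy
      have hxe := hl1 x hx
      rcases List.mem_cons.mp hy with rfl | hy
      · exact hxe
      · obtain ⟨r, hr, rfl⟩ := List.mem_map.mp hy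
        have := (cut_bounds h8 hr).1
        omega
  · intro i
    constructor
    · intro hi
      obtain ⟨hil, r, hrM, hocc⟩ := mem_cutsOf.mp hi
      rcases Nat.lt_trichotomy i e with hlt | rfl | hgt
      · apply List.mem_append_left
        have hrp : r = p := by
          rcases List.mem_append.mp hrM with hrQ | hrp
          · exfalso
            have hmem : i ∈ pvCutsOf Q cs := mem_cutsOf.mpr ⟨hil, r, hrQ, hocc⟩
            have := hmin i hmem
            omega
          · simpa using hrp
        subst hrp
        apply mem_cutsOf.mpr
        refine ⟨by omega, r, by simp, ?_⟩
        rw [List.take_take, Nat.min_eq_left (by omega)]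
        exact hocc
      · exact List.mem_append_right _ (by simp)
      · apply List.mem_append_right
        apply List.mem_cons_of_mem
        have hord : e + 8 ≤ i :=
          cut_order (h8Q q0 hq0) (h8 r hrM)
            (hb q0 (List.mem_append_left _ hq0) r hrM) hocc0 hocc hel hil hgt
        refine List.mem_map.mpr ⟨i - e, ?_, by omega⟩
        apply mem_cutsOf.mpr
        refine ⟨by rw [List.length_drop]; omega, r, hrM, ?_⟩
        exact (occ_shift (e := e) (i := i) (h8 r hrM) (by omega) hil).mp hocc
    · intro hi
      rcases List.mem_append.mp hi with hx | hx
      · obtain ⟨hxl, p', hp', hocc⟩ := mem_cutsOf.mp hx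
        simp only [List.mem_singleton] at hp'
        subst hp'
        rw [htl] at hxl
        apply mem_cutsOf.mpr
        refine ⟨by omega, p', List.mem_append_right _ (by simp), ?_⟩
        rw [List.take_take, Nat.min_eq_left (by omega)] at hocc
        exact hocc
      · rcases List.mem_cons.mp hx with rfl | hx
        · exact mem_cutsOf.mpr ⟨hel, q0, List.mem_append_left _ hq0, hocc0⟩
        · obtain ⟨r', hr', rfl⟩ := List.mem_map.mp hx
          obtain ⟨hrl, r, hrM, hocc⟩ := mem_cutsOf.mp hr'
          have hr8 := (cut_bounds h8 hr').1
          rw [List.length_drop] at hrl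
          apply mem_cutsOf.mpr
          refine ⟨by omega, r, hrM, ?_⟩
          apply (occ_shift (e := e) (i := r' + e) (h8 r hrM) (by omega) (by omega)).mpr
          rw [show r' + e - e = r' by omega]
          exact hocc

theorem chunksFrom_shift (cs : List Char) (e : Nat) :
    ∀ (l : List Nat) (s : Nat),
      pvChunksFrom cs (s + e) (l.map (· + e)) = pvChunksFrom (cs.drop e) s l := by
  intro l
  induction l with
  | nil =>
    intro s
    simp only [List.map_nil, pvChunksFrom, List.drop_drop]
    rw [Nat.add_comm e s]
  | cons i rest ih =>
    intro s
    simp only [List.map_cons, pvChunksFrom]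
    congr 1
    · rw [List.drop_drop, Nat.add_comm e s]
      congr 1
      omega
    · exact ih i

theorem chunksFrom_splitAt (cs : List Char) (e : Nat) :
    ∀ (l1 : List Nat) (l2 : List Nat) (start : Nat), (∀ x ∈ l1, x ≤ e) →
      pvChunksFrom cs start (l1 ++ e :: l2) =
        pvChunksFrom (cs.take e) start l1 ++ pvChunksFrom cs e l2 := by
  intro l1
  induction l1 with
  | nil =>
    intro l2 start _
    simp only [List.nil_append, pvChunksFrom, List.cons_append, List.nil_append]
    congr 1
    rw [List.drop_take]
  | cons x l1' ih =>
    intro l2 start h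
    simp only [List.cons_append, pvChunksFrom]
    congr 1
    · conv_rhs => rw [List.drop_take, List.take_take]
      congr 1
      have := h x List.mem_cons_self
      omega
    · exact ih l2 x (fun y hy => h y (List.mem_cons_of_mem _ hy))

-- ---- characterisation of Python str.split / str.find ----

theorem find_go_shift (sub : List Char) :
    ∀ (l : List Char) (k : Nat),
      PySem.Chars.find.go sub l k =
        (if PySem.Chars.find.go sub l 0 = -1 then -1 else PySem.Chars.find.go sub l 0 + k) := by
  intro l
  induction l with
  | nil =>
    intro k
    rw [findgo_nil, findgo_nil]
    by_cases h : sub.isEmpty <;> simp [h]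
  | cons c rest ih =>
    intro k
    rw [findgo_cons, findgo_cons]
    by_cases h : sub.isPrefixOf (c :: rest)
    · simp [h]
    · simp only [h, if_false, Bool.false_eq_true]
      rw [ih (k + 1), ih (0 + 1)]
      by_cases h2 : PySem.Chars.find.go sub rest 0 = -1
      · simp [h2]
      · have hge : -1 ≤ PySem.Chars.find.go sub rest 0 := PySem.Chars.neg_one_le_find rest sub
        simp only [h2, if_false]
        split
        · omega
        · omega

theorem find_cons_neg {sub : List Char} {c : Char} {rest : List Char}
    (h : ¬ sub.isPrefixOf (c :: rest) = true) :
    PySem.Chars.find (c :: rest) sub =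
      (if PySem.Chars.find rest sub = -1 then -1 else PySem.Chars.find rest sub + 1) := by
  show PySem.Chars.find.go sub (c :: rest) 0 = _
  rw [findgo_cons]
  simp only [h, if_false, Bool.false_eq_true]
  rw [find_go_shift sub rest (0 + 1)]
  rfl

theorem find_nil_nonempty (d : Char) (ds : List Char) :
    PySem.Chars.find [] (d :: ds) = -1 := by
  show PySem.Chars.find.go (d :: ds) [] 0 = -1
  rw [findgo_nil]
  simp

theorem find_eq_zero_of_prefix {sub : List Char} {c : Char} {rest : List Char}
    (h : sub.isPrefixOf (c :: rest) = true) :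
    PySem.Chars.find (c :: rest) sub = 0 := by
  show PySem.Chars.find.go sub (c :: rest) 0 = 0
  rw [findgo_cons]
  simp [h]

theorem sref_ne_nil (d : Char) (ds : List Char) : ∀ l, pvSref d ds l ≠ [] := by
  intro l
  induction l with
  | nil => rw [sref_nil]; simp
  | cons c rest ih =>
    rw [sref_cons]
    split
    · simp
    · cases h : pvSref d ds rest with
      | nil => exact absurd h ih
      | cons x xs => simp [List.modifyHead]

theorem sref_none {d : Char} {ds : List Char} :
    ∀ {c : List Char}, ¬ ((d :: ds) <:+: c) → pvSref d ds c = [c] := by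
  intro c
  induction c with
  | nil => intro _; rw [sref_nil]
  | cons a rest ih =>
    intro h
    rw [sref_cons]
    have hnp : ¬ ((d :: ds).isPrefixOf (a :: rest) = true) := by
      intro hp
      exact h (List.isPrefixOf_iff_prefix.mp hp).isInfix
    rw [if_neg hnp]
    have hr : ¬ ((d :: ds) <:+: rest) := by
      intro h'
      exact h (h'.trans (List.suffix_cons a rest).isInfix)
    rw [ih hr]
    rfl

theorem go_spec (d : Char) (ds : List Char) :
    ∀ (fuel : Nat) (l cur : List Char) (acc : List (List Char)), l.length < fuel →
      PySem.Chars.splitOn.go (d :: ds) fuel l cur acc =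
        acc.reverse ++ (pvSref d ds l).modifyHead (cur.reverse ++ ·) := by
  intro fuel
  induction fuel with
  | zero => intro l cur acc h; omega
  | succ f ih =>
    intro l cur acc h
    cases l with
    | nil =>
      rw [splitgo_succ_nil, sref_nil]
      simp [List.modifyHead]
    | cons c rest =>
      rw [splitgo_succ_cons, sref_cons]
      by_cases hp : (d :: ds).isPrefixOf (c :: rest) = true
      · rw [if_pos hp, if_pos hp]
        have hlen : ((c :: rest).drop (d :: ds).length).length < f := by
          simp only [List.length_drop, List.length_cons] at h ⊢
          omega
        rw [ih _ _ _ hlen]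
        simp only [List.length_cons, List.drop_succ_cons]
        cases hs : pvSref d ds (rest.drop ds.length) with
        | nil => exact absurd hs (sref_ne_nil d ds _)
        | cons x xs =>
          simp [List.modifyHead, List.reverse_cons, List.append_assoc]
      · rw [if_neg hp, if_neg hp]
        have hlen : rest.length < f := by
          simp only [List.length_cons] at h
          omega
        rw [ih _ _ _ hlen]
        cases hs : pvSref d ds rest with
        | nil => exact absurd hs (sref_ne_nil d ds _)
        | cons x xs =>
          simp [List.modifyHead, List.reverse_cons, List.append_assoc]

theorem splitOn_eq_sref (d : Char) (ds : List Char) (l : List Char) :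
    PySem.Chars.splitOn l (d :: ds) = pvSref d ds l := by
  unfold PySem.Chars.splitOn
  rw [go_spec d ds (l.length + 1) l [] [] (by omega)]
  cases hs : pvSref d ds l with
  | nil => exact absurd hs (sref_ne_nil d ds _)
  | cons x xs => simp [List.modifyHead]

theorem sref_first (d : Char) (ds : List Char) :
    ∀ (c : List Char), 0 ≤ PySem.Chars.find c (d :: ds) →
      pvSref d ds c =
        c.take (PySem.Chars.find c (d :: ds)).toNat ::
          pvSref d ds (c.drop ((PySem.Chars.find c (d :: ds)).toNat + ds.length + 1)) := by
  intro c
  induction c with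
  | nil =>
    intro h
    rw [find_nil_nonempty] at h
    omega
  | cons a rest ih =>
    intro h
    by_cases hp : (d :: ds).isPrefixOf (a :: rest) = true
    · have hf : PySem.Chars.find (a :: rest) (d :: ds) = 0 := find_eq_zero_of_prefix hp
      rw [sref_cons, if_pos hp, hf]
      simp only [Int.toNat_zero, List.take_zero, Nat.zero_add]
      rw [show ds.length + 1 = Nat.succ ds.length from rfl, List.drop_succ_cons]
    · have hf := find_cons_neg hp
      rw [sref_cons, if_neg hp]
      by_cases h0 : PySem.Chars.find rest (d :: ds) = -1
      · rw [hf, if_pos h0] at h; omega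
      · have hr0 : 0 ≤ PySem.Chars.find rest (d :: ds) := by
          have := PySem.Chars.neg_one_le_find rest (d :: ds)
          omega
        rw [ih hr0]
        rw [hf, if_neg h0]
        rw [show (PySem.Chars.find rest (d :: ds) + 1).toNat
            = (PySem.Chars.find rest (d :: ds)).toNat + 1 by omega]
        simp only [List.modifyHead, List.take_succ_cons]
        rw [show (PySem.Chars.find rest (d :: ds)).toNat + 1 + ds.length + 1
            = ((PySem.Chars.find rest (d :: ds)).toNat + ds.length + 1) + 1 by omega]
        rw [List.drop_succ_cons]

theorem rejoin_cons {p x : List Char} {xs : List (List Char)} (h : xs ≠ []) :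
    pvRejoin p (x :: xs) = (x ++ p) :: pvRejoin p xs := by
  cases xs with
  | nil => exact absurd rfl h
  | cons y ys => rfl

theorem rejoin_sref (d : Char) (ds : List Char) :
    ∀ (c : List Char), pvRejoin (d :: ds) (pvSref d ds c) = pvCutRec d ds c := by
  have H : ∀ (n : Nat) (c : List Char), c.length ≤ n →
      pvRejoin (d :: ds) (pvSref d ds c) = pvCutRec d ds c := by
    intro n
    induction n with
    | zero =>
      intro c hc
      have hcn : c = [] := by cases c <;> simp_all
      subst hcn
      rw [sref_nil, cutRec_eq, if_pos (find_nil_nonempty d ds)]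
      rfl
    | succ m ih =>
      intro c hc
      by_cases hf : PySem.Chars.find c (d :: ds) = -1
      · have hni : ¬ ((d :: ds) <:+: c) := by
          intro h'
          exact absurd hf ((PySem.Chars.find_ne_neg_one_iff c (d :: ds)).mpr h')
        rw [sref_none hni, cutRec_eq, if_pos hf]
        rfl
      · have h0 : 0 ≤ PySem.Chars.find c (d :: ds) := by
          have := PySem.Chars.neg_one_le_find c (d :: ds)
          omega
        have hcne : c ≠ [] := by
          intro h'; subst h'; exact hf (find_nil_nonempty d ds)
        rw [sref_first d ds c h0]
        rw [rejoin_cons (sref_ne_nil d ds _)]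
        have hlen : (c.drop ((PySem.Chars.find c (d :: ds)).toNat + ds.length + 1)).length ≤ m := by
          have hc1 : 1 ≤ c.length := by cases c <;> simp_all
          rw [List.length_drop]
          omega
        rw [ih _ hlen]
        conv_rhs => rw [cutRec_eq]
        rw [if_neg hf]
        congr 1
        -- c.take j ++ (d :: ds) = c.take (j + ds.length + 1)
        have hpre : (d :: ds) <+: c.drop (PySem.Chars.find c (d :: ds)).toNat :=
          (PySem.Chars.find_spec h0).1
        rw [show (PySem.Chars.find c (d :: ds)).toNat + ds.length + 1
            = (PySem.Chars.find c (d :: ds)).toNat + (ds.length + 1) by omega]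
        rw [List.take_add]
        congr 1
        have hp := List.prefix_iff_eq_take.mp hpre
        rw [List.length_cons] at hp
        exact hp
  intro c
  exact H c.length c (le_refl _)

theorem mapg_rejoin (p : List Char) (n : Nat) :
    ∀ (xs : List (List Char)) (k : Int), k + xs.length = n →
      (PySem.List.enumerate xs k).map
        (fun pi => if pi.1 = (n : Int) - 1 then pi.2 else pi.2 ++ p) = pvRejoin p xs := by
  intro xs
  induction xs with
  | nil => intro k _; rw [enum_nil]; rfl
  | cons x rest ih =>
    intro k hk
    rw [enum_cons]
    simp only [List.map_cons]
    cases rest with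
    | nil =>
      have hkn : k = (n : Int) - 1 := by
        simp only [List.length_cons, List.length_nil] at hk
        omega
      rw [if_pos hkn]
      rfl
    | cons y ys =>
      have hkn : ¬ (k = (n : Int) - 1) := by
        simp only [List.length_cons] at hk
        push_cast at hk
        omega
      rw [if_neg hkn]
      rw [ih (k + 1) (by simp only [List.length_cons] at hk ⊢; push_cast at hk ⊢; omega)]
      rfl

theorem filter_append_nonempty {new X : List (List Char)} (h : ∀ x ∈ new, x ≠ []) :
    (new ++ X).filter (fun x => decide (x ≠ [])) = new ++ X.filter (fun x => decide (x ≠ [])) := by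
  rw [List.filter_append]
  congr 1
  apply List.filter_eq_self.mpr
  intro a ha
  simpa using h a ha

theorem isIn_true_iff (sub s : List Char) :
    PySem.Chars.isIn sub s = true ↔ PySem.Chars.find s sub ≠ -1 := by
  unfold PySem.Chars.isIn
  simp [bne_iff_ne]

theorem ainner_eq {d : Char} {ds : List Char} {new : List (List Char)} {c : List Char}
    (hnew : ∀ x ∈ new, x ≠ []) (hc : c ≠ []) :
    pvAInner (d :: ds) new c =
      new ++ (pvCutRec d ds c).filter (fun x => decide (x ≠ [])) := by
  by_cases hin : PySem.Chars.isIn (d :: ds) c = true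
  · unfold pvAInner
    rw [if_pos hin]
    have hparts : pvParts c (d :: ds) = pvSref d ds c := by
      unfold pvParts
      rw [show PySem.Chars.split? c (d :: ds)
          = some (PySem.Chars.splitOn c (d :: ds)) by simp [PySem.Chars.split?]]
      rw [Option.getD_some, splitOn_eq_sref]
    rw [hparts]
    have hn1 : 1 ≤ (pvSref d ds c).length := by
      have := sref_ne_nil d ds c
      cases h : pvSref d ds c with
      | nil => exact absurd h this
      | cons x xs => simp
    have hbody : pvAppendPiece (d :: ds) (pvSref d ds c).length
        = fun acc pi => acc ++ [if pi.1 = ((pvSref d ds c).length : Int) - 1 then pi.2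
                                else pi.2 ++ (d :: ds)] := by
      funext acc pi
      rcases pi with ⟨i, a⟩
      unfold pvAppendPiece
      by_cases hi : i = 0
      · subst hi
        by_cases h1 : 1 < (pvSref d ds c).length
        · have hne0 : ¬ ((0 : Int) = ((pvSref d ds c).length : Int) - 1) := by omega
          simp [h1, hne0]
        · have h0' : ((pvSref d ds c).length : Int) - 1 = 0 := by omega
          simp [h1, h0']
      · by_cases h2 : i = ((pvSref d ds c).length : Int) - 1 <;> simp [hi, h2] <;> omega
    rw [hbody, PySem.List.foldl_append_singleton_eq_map]
    rw [mapg_rejoin (d :: ds) (pvSref d ds c).length (pvSref d ds c) 0 (by simp)]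
    rw [rejoin_sref]
    exact filter_append_nonempty hnew
  · unfold pvAInner
    rw [if_neg hin]
    have hf : PySem.Chars.find c (d :: ds) = -1 := by
      by_contra h
      exact hin ((isIn_true_iff _ _).mpr h)
    rw [cutRec_eq, if_pos hf]
    simp [hc]

theorem foldpass (d : Char) (ds : List Char) :
    ∀ (L new : List (List Char)), (∀ x ∈ new, x ≠ []) → (∀ c ∈ L, c ≠ []) →
      L.foldl (pvAInner (d :: ds)) new =
        new ++ L.flatMap (fun c => (pvCutRec d ds c).filter (fun x => decide (x ≠ []))) := by
  intro L
  induction L with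
  | nil => intro new _ _; simp
  | cons c L' ih =>
    intro new hnew hL
    rw [List.foldl_cons]
    rw [ainner_eq hnew (hL c List.mem_cons_self)]
    rw [ih _ (by
      intro x hx
      rcases List.mem_append.mp hx with h | h
      · exact hnew x h
      · have := List.mem_filter.mp h
        simpa using this.2) (fun c' hc' => hL c' (List.mem_cons_of_mem _ hc'))]
    rw [List.flatMap_cons, List.append_assoc]

-- ---- the single-prefix pass in cut-position form ----

theorem infix_of_cut {p cs : List Char} {i : Nat} (hi : i ≤ cs.length) (h : p <:+ cs.take i) :
    p <:+: cs :=
  h.isInfix.trans (List.take_prefix i cs).isInfix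

theorem cuts_nil_iff_find {d : Char} {ds : List Char} {cs : List Char}
    (h8 : (d :: ds).length = 8) :
    pvCutsOf [d :: ds] cs = [] ↔ PySem.Chars.find cs (d :: ds) = -1 := by
  constructor
  · intro h
    apply (PySem.Chars.find_eq_neg_one_iff cs (d :: ds)).mpr
    intro hinf
    obtain ⟨u, v, huv⟩ := hinf
    have h1 : (u ++ (d :: ds)) ++ v = cs := huv
    have h7 : ds.length = 7 := by
      simp only [List.length_cons] at h8
      omega
    have htake : cs.take (u.length + 8) = u ++ (d :: ds) := by
      rw [← h1]
      exact List.take_left' (by simp only [List.length_append, List.length_cons]; omega)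
    have hbound : u.length + 8 ≤ cs.length := by
      rw [← h1]
      simp only [List.length_append, List.length_cons]
      omega
    have hmem : (u.length + 8) ∈ pvCutsOf [d :: ds] cs :=
      mem_cutsOf.mpr ⟨hbound, d :: ds, by simp, ⟨u, htake.symm⟩⟩
    rw [h] at hmem
    simp at hmem
  · intro h
    have hni := (PySem.Chars.find_eq_neg_one_iff cs (d :: ds)).mp h
    cases hcuts : pvCutsOf [d :: ds] cs with
    | nil => rfl
    | cons x xs =>
      exfalso
      have hx : x ∈ pvCutsOf [d :: ds] cs := by rw [hcuts]; exact List.mem_cons_self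
      obtain ⟨hxl, p', hp', hocc⟩ := mem_cutsOf.mp hx
      simp only [List.mem_singleton] at hp'
      subst hp'
      exact hni (infix_of_cut hxl hocc)

theorem single_chunks (d : Char) (ds : List Char) (h8 : (d :: ds).length = 8)
    (hbp : ∀ k, k < 8 → 0 < k → (d :: ds).drop k ≠ (d :: ds).take (8 - k)) :
    ∀ (cs : List Char), pvChunksFrom cs 0 (pvCutsOf [d :: ds] cs) = pvCutRec d ds cs := by
  have H : ∀ (n : Nat) (cs : List Char), cs.length ≤ n →
      pvChunksFrom cs 0 (pvCutsOf [d :: ds] cs) = pvCutRec d ds cs := by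
    intro n
    induction n with
    | zero =>
      intro cs hcs
      have hnil : cs = [] := by cases cs <;> simp_all
      subst hnil
      rw [(cuts_nil_iff_find h8).mpr (find_nil_nonempty d ds)]
      rw [cutRec_eq, if_pos (find_nil_nonempty d ds)]
      rfl
    | succ m ih =>
      intro cs hcs
      by_cases hf : PySem.Chars.find cs (d :: ds) = -1
      · rw [(cuts_nil_iff_find h8).mpr hf]
        rw [cutRec_eq, if_pos hf]
        rfl
      · have h0 : 0 ≤ PySem.Chars.find cs (d :: ds) := by
          have := PySem.Chars.neg_one_le_find cs (d :: ds)
          omega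
        have hpre : (d :: ds) <+: cs.drop (PySem.Chars.find cs (d :: ds)).toNat :=
          (PySem.Chars.find_spec h0).1
        have hjlen : (PySem.Chars.find cs (d :: ds)).toNat + 8 ≤ cs.length := by
          have hll := hpre.length_le
          rw [h8, List.length_drop] at hll
          by_cases hj : (PySem.Chars.find cs (d :: ds)).toNat ≤ cs.length
          · omega
          · exfalso
            rw [List.drop_eq_nil_of_le (by omega)] at hpre
            have := hpre.length_le
            rw [h8] at this
            simp at this
        have he : ((PySem.Chars.find cs (d :: ds)).toNat + 8) ∈ pvCutsOf [d :: ds] cs := by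
          apply mem_cutsOf.mpr
          refine ⟨hjlen, d :: ds, by simp, ?_⟩
          apply occ_intro (by omega) hjlen
          rw [show (PySem.Chars.find cs (d :: ds)).toNat + 8 - 8
              = (PySem.Chars.find cs (d :: ds)).toNat by omega]
          have hp := List.prefix_iff_eq_take.mp hpre
          rw [h8] at hp
          exact hp
        have hmin : ∀ i ∈ pvCutsOf [d :: ds] cs,
            (PySem.Chars.find cs (d :: ds)).toNat + 8 ≤ i := by
          intro i hi
          obtain ⟨hil, p', hp', hocc⟩ := mem_cutsOf.mp hi
          simp only [List.mem_singleton] at hp'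
          subst hp'
          obtain ⟨hi8, hpe⟩ := occ_eq h8 hil hocc
          have hpre' : (d :: ds) <+: cs.drop (i - 8) := by
            apply List.prefix_iff_eq_take.mpr
            rw [h8]
            exact hpe
          by_contra hcon
          exact (PySem.Chars.find_spec h0).2 (i - 8) (by omega) hpre'
        rw [cuts_dec (by simp [h8]) (by
            intro p' hp' q' hq' k hk1 hk2
            simp only [List.mem_singleton] at hp' hq'
            subst hp'; subst hq'
            exact hbp k hk1 hk2) he hmin]
        simp only [pvChunksFrom]
        have hshift := chunksFrom_shift cs ((PySem.Chars.find cs (d :: ds)).toNat + 8)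
          (pvCutsOf [d :: ds] (cs.drop ((PySem.Chars.find cs (d :: ds)).toNat + 8))) 0
        rw [Nat.zero_add] at hshift
        rw [hshift]
        have hlen : (cs.drop ((PySem.Chars.find cs (d :: ds)).toNat + 8)).length ≤ m := by
          rw [List.length_drop]
          omega
        rw [ih _ hlen]
        conv_rhs => rw [cutRec_eq, if_neg hf]
        have h7 : ds.length = 7 := by
          simp only [List.length_cons] at h8
          omega
        rw [h7]
        rw [show (PySem.Chars.find cs (d :: ds)).toNat + 7 + 1
            = (PySem.Chars.find cs (d :: ds)).toNat + 8 by omega]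
        simp only [List.drop_zero, Nat.sub_zero]
  intro cs
  exact H cs.length cs (le_refl _)

theorem cutsOf_append_eq_single {Q : List (List Char)} {p cs : List Char}
    (h : pvCutsOf Q cs = []) : pvCutsOf (Q ++ [p]) cs = pvCutsOf [p] cs := by
  unfold pvCutsOf at *
  apply List.filter_congr
  intro i hi
  have hQ : Q.any (fun q => PySem.Chars.endswith (cs.take i) q) = false := by
    by_contra hq
    have hmem : i ∈ ([] : List Nat) := by
      rw [← h]
      apply List.mem_filter.mpr
      exact ⟨hi, by simpa using hq⟩
    simp at hmem
  rw [List.any_append, hQ]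
  simp

theorem flatMap_filter_eq {L : List (List Char)} {f : List Char → List (List Char)}
    (h : ∀ x ∈ L, x = [] → f x = []) :
    (L.filter (fun x => decide (x ≠ []))).flatMap f = L.flatMap f := by
  induction L with
  | nil => rfl
  | cons c L' ih =>
    by_cases hc : c = []
    · subst hc
      simp only [List.filter_cons]
      rw [if_neg (by simp)]
      rw [List.flatMap_cons, h [] List.mem_cons_self rfl]
      simpa using ih (fun x hx => h x (List.mem_cons_of_mem _ hx))
    · simp only [List.filter_cons]
      rw [if_pos (by simpa using hc)]
      rw [List.flatMap_cons, List.flatMap_cons]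
      rw [ih (fun x hx => h x (List.mem_cons_of_mem _ hx))]

theorem filter_flatMap (L : List (List Char)) (f : List Char → List (List Char)) :
    (L.flatMap f).filter (fun x => decide (x ≠ [])) =
      L.flatMap (fun c => (f c).filter (fun x => decide (x ≠ []))) := by
  induction L with
  | nil => rfl
  | cons c L' ih =>
    rw [List.flatMap_cons, List.flatMap_cons, List.filter_append, ih]

theorem union_chunks (d : Char) (ds : List Char) (Q : List (List Char))
    (h8 : ∀ r ∈ Q ++ [d :: ds], r.length = 8)
    (hb : ∀ r ∈ Q ++ [d :: ds], ∀ s ∈ Q ++ [d :: ds], ∀ k, k < 8 → 0 < k →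
      r.drop k ≠ s.take (8 - k))
    (hne : ∀ q ∈ Q, (d :: ds) ≠ q) :
    ∀ (cs : List Char),
      pvChunksFrom cs 0 (pvCutsOf (Q ++ [d :: ds]) cs) =
        (pvChunksFrom cs 0 (pvCutsOf Q cs)).flatMap (pvCutRec d ds) := by
  have hmem : (d :: ds) ∈ Q ++ [d :: ds] := List.mem_append_right _ (by simp)
  have hp8 : (d :: ds).length = 8 := h8 _ hmem
  have hpb : ∀ k, k < 8 → 0 < k → (d :: ds).drop k ≠ (d :: ds).take (8 - k) :=
    hb _ hmem _ hmem
  have h8Q : ∀ r ∈ Q, r.length = 8 := fun r hr => h8 r (List.mem_append_left _ hr)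
  have hbQ : ∀ r ∈ Q, ∀ s ∈ Q, ∀ k, k < 8 → 0 < k → r.drop k ≠ s.take (8 - k) :=
    fun r hr s hs => hb r (List.mem_append_left _ hr) s (List.mem_append_left _ hs)
  have H : ∀ (n : Nat) (cs : List Char), cs.length ≤ n →
      pvChunksFrom cs 0 (pvCutsOf (Q ++ [d :: ds]) cs) =
        (pvChunksFrom cs 0 (pvCutsOf Q cs)).flatMap (pvCutRec d ds) := by
    intro n
    induction n with
    | zero =>
      intro cs hcs
      have hnil : cs = [] := by cases cs <;> simp_all
      subst hnil
      have hQnil : pvCutsOf Q [] = [] := by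
        cases h : pvCutsOf Q [] with
        | nil => rfl
        | cons x xs =>
          exfalso
          have hx : x ∈ pvCutsOf Q [] := by rw [h]; exact List.mem_cons_self
          have := cut_bounds h8Q hx
          simp at this
          omega
      rw [cutsOf_append_eq_single hQnil, hQnil]
      rw [single_chunks d ds hp8 hpb]
      simp [pvChunksFrom]
    | succ m ih =>
      intro cs hcs
      cases hQc : pvCutsOf Q cs with
      | nil =>
        rw [cutsOf_append_eq_single hQc]
        rw [single_chunks d ds hp8 hpb]
        simp [pvChunksFrom]
      | cons e rest =>
        have he : e ∈ pvCutsOf Q cs := by rw [hQc]; exact List.mem_cons_self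
        have hmin : ∀ i ∈ pvCutsOf Q cs, e ≤ i := by
          intro i hi
          have hpw := cuts_pairwise Q cs
          rw [hQc] at hpw hi
          rcases List.mem_cons.mp hi with rfl | hi
          · exact le_refl i
          · exact le_of_lt ((List.pairwise_cons.mp hpw).1 i hi)
        have he8 := (cut_bounds h8Q he).1
        have hel := (cut_bounds h8Q he).2
        rw [cuts_union_dec h8 hb hne he hmin]
        rw [chunksFrom_splitAt cs e _ _ 0 (by
          intro x hx
          obtain ⟨hxl, _, _, _⟩ := mem_cutsOf.mp hx
          rw [List.length_take] at hxl
          omega)]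
        rw [single_chunks d ds hp8 hpb (cs.take e)]
        have hshift := chunksFrom_shift cs e (pvCutsOf (Q ++ [d :: ds]) (cs.drop e)) 0
        rw [Nat.zero_add] at hshift
        rw [hshift]
        have hlen : (cs.drop e).length ≤ m := by
          rw [List.length_drop]
          omega
        rw [ih _ hlen]
        have hdec := cuts_dec h8Q hbQ he hmin
        rw [hQc] at hdec
        have hrest : rest = (pvCutsOf Q (cs.drop e)).map (· + e) := by
          injection hdec
        rw [hrest]
        simp only [pvChunksFrom]
        have hshift2 := chunksFrom_shift cs e (pvCutsOf Q (cs.drop e)) 0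
        rw [Nat.zero_add] at hshift2
        rw [hshift2]
        rw [List.flatMap_cons]
        simp only [List.drop_zero, Nat.sub_zero]
  intro cs
  exact H cs.length cs (le_refl _)

theorem state_nil (cs : List Char) : pvState [] cs = [cs] := by
  unfold pvState pvCutsOf
  simp

theorem step (d : Char) (ds : List Char) (Q : List (List Char))
    (h8 : ∀ r ∈ Q ++ [d :: ds], r.length = 8)
    (hb : ∀ r ∈ Q ++ [d :: ds], ∀ s ∈ Q ++ [d :: ds], ∀ k, k < 8 → 0 < k →
      r.drop k ≠ s.take (8 - k))
    (hne : ∀ q ∈ Q, (d :: ds) ≠ q) (cs : List Char) :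
    (pvState Q cs).foldl (pvAInner (d :: ds)) [] = pvState (Q ++ [d :: ds]) cs := by
  have hmem : (d :: ds) ∈ Q ++ [d :: ds] := List.mem_append_right _ (by simp)
  have hp8 : (d :: ds).length = 8 := h8 _ hmem
  have hpb : ∀ k, k < 8 → 0 < k → (d :: ds).drop k ≠ (d :: ds).take (8 - k) :=
    hb _ hmem _ hmem
  have h8Q : ∀ r ∈ Q, r.length = 8 := fun r hr => h8 r (List.mem_append_left _ hr)
  by_cases hQ : pvCutsOf Q cs = []
  · unfold pvState
    rw [hQ]
    simp only [List.isEmpty_nil, if_true, List.foldl_cons, List.foldl_nil]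
    rw [cutsOf_append_eq_single hQ]
    by_cases hin : PySem.Chars.isIn (d :: ds) cs = true
    · have hf : PySem.Chars.find cs (d :: ds) ≠ -1 := (isIn_true_iff _ _).mp hin
      have hcne : cs ≠ [] := by
        intro h'; subst h'; exact hf (find_nil_nonempty d ds)
      rw [ainner_eq (by simp) hcne]
      have hcuts : pvCutsOf [d :: ds] cs ≠ [] := by
        intro h'
        exact hf ((cuts_nil_iff_find hp8).mp h')
      rw [if_neg (by simpa [List.isEmpty_iff] using hcuts)]
      rw [single_chunks d ds hp8 hpb]
      simp
    · unfold pvAInner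
      rw [if_neg hin]
      have hf : PySem.Chars.find cs (d :: ds) = -1 := by
        by_contra h
        exact hin ((isIn_true_iff _ _).mpr h)
      rw [(cuts_nil_iff_find hp8).mpr hf]
      simp
  · unfold pvState
    rw [if_neg (by simpa [List.isEmpty_iff] using hQ)]
    have hfp := foldpass d ds
      ((pvChunksFrom cs 0 (pvCutsOf Q cs)).filter (fun x => decide (x ≠ []))) []
      (by simp)
      (by
        intro c hc
        have := List.mem_filter.mp hc
        simpa using this.2)
    rw [hfp, List.nil_append]
    rw [flatMap_filter_eq (by
      intro x _ hx
      subst hx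
      rw [cutRec_eq, if_pos (find_nil_nonempty d ds)]
      simp)]
    rw [← filter_flatMap]
    rw [← union_chunks d ds Q h8 hb hne cs]
    have hcuts : pvCutsOf (Q ++ [d :: ds]) cs ≠ [] := by
      cases h : pvCutsOf Q cs with
      | nil => exact absurd h hQ
      | cons e rest =>
        have he : e ∈ pvCutsOf Q cs := by rw [h]; exact List.mem_cons_self
        obtain ⟨hel, q0, hq0, hocc0⟩ := mem_cutsOf.mp he
        exact List.ne_nil_of_mem
          (mem_cutsOf.mpr ⟨hel, q0, List.mem_append_left _ hq0, hocc0⟩)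
    rw [if_neg (by simpa [List.isEmpty_iff] using hcuts)]

theorem main_fold (cs : List Char) :
    pvPrefixes.foldl (fun out pref => out.foldl (pvAInner pref) []) [cs] =
      pvState pvPrefixes cs := by
  have h1 := step 's' ['k','_','l','i','v','e','_'] [] (by decide) (by decide) (by decide) cs
  have h2 := step 's' ['k','_','t','e','s','t','_']
    [['s','k','_','l','i','v','e','_']] (by decide) (by decide) (by decide) cs
  have h3 := step 'p' ['k','_','l','i','v','e','_']
    [['s','k','_','l','i','v','e','_'], ['s','k','_','t','e','s','t','_']]
    (by decide) (by decide) (by decide) cs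
  have h4 := step 'p' ['k','_','t','e','s','t','_']
    [['s','k','_','l','i','v','e','_'], ['s','k','_','t','e','s','t','_'],
     ['p','k','_','l','i','v','e','_']] (by decide) (by decide) (by decide) cs
  have h5 := step 'r' ['k','_','l','i','v','e','_']
    [['s','k','_','l','i','v','e','_'], ['s','k','_','t','e','s','t','_'],
     ['p','k','_','l','i','v','e','_'], ['p','k','_','t','e','s','t','_']]
    (by decide) (by decide) (by decide) cs
  have h6 := step 'r' ['k','_','t','e','s','t','_']
    [['s','k','_','l','i','v','e','_'], ['s','k','_','t','e','s','t','_'],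
     ['p','k','_','l','i','v','e','_'], ['p','k','_','t','e','s','t','_'],
     ['r','k','_','l','i','v','e','_']] (by decide) (by decide) (by decide) cs
  simp only [List.cons_append, List.nil_append] at h1 h2 h3 h4 h5 h6
  rw [state_nil] at h1
  simp only [List.foldl_cons, List.foldl_nil] at h1
  simp only [pvPrefixes, List.foldl_cons, List.foldl_nil]
  rw [h1, h2, h3, h4, h5, h6]

-- ===== VERDICT (by name: the statement is the Claim_ definition above) =====
theorem split_secret_boundaries_py_spec : Claim_equal_split_secret_boundaries_py := by
  intro s _
  unfold Spec_split_secret_boundaries_py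
  unfold split_secret_boundaries_py split_secret_boundaries_py_alt
  rw [main_fold s.toList]
  unfold pvState
  by_cases h : (pvCutsOf pvPrefixes s.toList).isEmpty = true
  · simp [h, String.ofList_toList]
  · simp [h]
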